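-- pv_equiv track=rewrite | github.com/enuje12/Student-Competence-Analysis | student_competence_model.py | reflective_prompt
-- ===== SOURCE A (Python) =====
-- def reflective_prompt(errors: list) -> str:
--     if not errors:
--         return "How could this code be improved for efficiency or readability?"
--     if any("==" in e or "=" in e for e in errors):
--         return "What is the difference between '=' and '==' in Python logic?"
--     if any("infinite loop" in e for e in errors):
--         return "What conditions should be added to stop this loop?"
--     if any("Syntax Error" in e for e in errors):
--         return "How does Python tell you where syntax errors occur?"
--     return "Why does the error occur, and how would fixing it change the output?"
-- ===== SOURCE B (Python) =====
-- _PROMPTS = [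
--     "What is the difference between '=' and '==' in Python logic?",
--     "What conditions should be added to stop this loop?",
--     "How does Python tell you where syntax errors occur?",
--     "Why does the error occur, and how would fixing it change the output?",
-- ]
--
-- def _rank(e: str) -> int:
--     if "==" in e or "=" in e:
--         return 0
--     if "infinite loop" in e:
--         return 1
--     if "Syntax Error" in e:
--         return 2
--     return 3
--
-- def reflective_prompt(errors: list) -> str:
--     if not errors:
--         return "How could this code be improved for efficiency or readability?"
--     return _PROMPTS[min(map(_rank, errors))]
-- ===== Notes on version B (the rewrite author's own statement) =====
-- stated objective: alternative
-- what changed: A cascades up to three separate any()-scans over the list; B maps each error to a numeric priority rank, takes the minimum rank in one pass, and indexes a prompt table with it.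
import Mathlib
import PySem

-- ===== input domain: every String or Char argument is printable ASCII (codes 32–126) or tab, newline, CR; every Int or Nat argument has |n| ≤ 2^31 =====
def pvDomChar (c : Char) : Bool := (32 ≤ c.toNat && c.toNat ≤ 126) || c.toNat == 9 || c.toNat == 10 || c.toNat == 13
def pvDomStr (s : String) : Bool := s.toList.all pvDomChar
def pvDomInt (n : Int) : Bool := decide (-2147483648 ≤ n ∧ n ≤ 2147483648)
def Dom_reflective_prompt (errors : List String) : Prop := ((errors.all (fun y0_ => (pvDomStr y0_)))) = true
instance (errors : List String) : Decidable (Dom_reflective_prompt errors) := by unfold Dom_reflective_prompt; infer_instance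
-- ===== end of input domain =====

-- B replaces A's cascade of any()-scans by a rank-and-table algorithm: each error is mapped
-- to a numeric priority rank, the minimum rank is taken in one pass, and a prompt table is
-- indexed with it (alternative decomposition, same cost).


-- ===== PORT A =====
def reflective_prompt (errors : List String) : String :=
  if errors.isEmpty then
    "How could this code be improved for efficiency or readability?"
  else if errors.any (fun e => PySem.Str.isIn "==" e || PySem.Str.isIn "=" e) then
    "What is the difference between '=' and '==' in Python logic?"
  else if errors.any (fun e => PySem.Str.isIn "infinite loop" e) then
    "What conditions should be added to stop this loop?"
  else if errors.any (fun e => PySem.Str.isIn "Syntax Error" e) then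
    "How does Python tell you where syntax errors occur?"
  else
    "Why does the error occur, and how would fixing it change the output?"

-- ===== PORT B =====
-- the prompt table _PROMPTS
def pvPrompts : List String :=
  ["What is the difference between '=' and '==' in Python logic?",
   "What conditions should be added to stop this loop?",
   "How does Python tell you where syntax errors occur?",
   "Why does the error occur, and how would fixing it change the output?"]

-- _rank: priority class of one error message
def pvRank (e : String) : Nat :=
  if PySem.Str.isIn "==" e || PySem.Str.isIn "=" e then 0
  else if PySem.Str.isIn "infinite loop" e then 1
  else if PySem.Str.isIn "Syntax Error" e then 2
  else 3

-- min(map(_rank, errors)) then table lookup; the `none`/getD "" branch is unreachable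
-- (min? is none only on the empty list, excluded by the isEmpty test)
def reflective_prompt_alt (errors : List String) : String :=
  if errors.isEmpty then
    "How could this code be improved for efficiency or readability?"
  else
    match PySem.List.min? (errors.map pvRank) (fun x => x) with
    | some m => pvPrompts.getD m ""
    | none => ""

-- ===== PRECONDITION & SPEC =====
def Spec_reflective_prompt (errors : List String) (out : String) : Prop := out = reflective_prompt_alt errors
instance (errors : List String) (out : String) : Decidable (Spec_reflective_prompt errors out) := by unfold Spec_reflective_prompt; infer_instance

-- ===== CLAIM (what is proved, stated in full; the proofs are below) =====
def Claim_equal_reflective_prompt : Prop := ∀ (errors : List String), Dom_reflective_prompt errors → Spec_reflective_prompt errors (reflective_prompt errors)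

-- ===== LEMMAS AND PROOFS =====
-- the rank A's cascade of any-scans implicitly selects
def pvCascadeRank (t : List String) : Nat :=
  if t.any (fun e => PySem.Str.isIn "==" e || PySem.Str.isIn "=" e) then 0
  else if t.any (fun e => PySem.Str.isIn "infinite loop" e) then 1
  else if t.any (fun e => PySem.Str.isIn "Syntax Error" e) then 2
  else 3

theorem pvMinIf (b1 b2 b3 a1 a2 a3 : Bool) :
    min (if b1 then 0 else if b2 then 1 else if b3 then 2 else 3)
        (if a1 then 0 else if a2 then 1 else if a3 then 2 else 3)
    = (if b1 || a1 then 0 else if b2 || a2 then 1 else if b3 || a3 then 2 else (3 : Nat)) := by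
  revert b1 b2 b3 a1 a2 a3; decide

theorem pvRank_min_cascade (e : String) (t : List String) :
    min (pvRank e) (pvCascadeRank t) = pvCascadeRank (e :: t) := by
  unfold pvRank pvCascadeRank
  simp only [List.any_cons]
  exact pvMinIf _ _ _ _ _ _

theorem pvFoldl_min_rank (t : List String) (a : Nat) (ha : a ≤ 3) :
    (t.map pvRank).foldl min a = min a (pvCascadeRank t) := by
  induction t generalizing a with
  | nil => simp [pvCascadeRank]; omega
  | cons e t ih =>
    have hr : pvRank e ≤ 3 := by unfold pvRank; split_ifs <;> omega
    simp only [List.map_cons, List.foldl_cons]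
    rw [ih (min a (pvRank e)) (by omega), min_assoc, pvRank_min_cascade]

theorem pvRank_le (e : String) : pvRank e ≤ 3 := by unfold pvRank; split_ifs <;> omega

-- ===== VERDICT (by name: the statement is the Claim_ definition above) =====
theorem reflective_prompt_spec : Claim_equal_reflective_prompt := by
  intro errors _
  unfold Spec_reflective_prompt reflective_prompt reflective_prompt_alt
  cases errors with
  | nil => simp
  | cons e t =>
    simp only [List.isEmpty_cons, List.map_cons, PySem.List.min?_id_cons, if_false,
      Bool.false_eq_true]
    rw [pvFoldl_min_rank t (pvRank e) (pvRank_le e), pvRank_min_cascade]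
    unfold pvCascadeRank
    split_ifs <;> rfl
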